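-- pv_equiv track=rewrite | github.com/Bishwa100/resumemakerAI | src/resumemaker/tools/resume_analyzer_tool.py | _has_tables
-- ===== SOURCE A (Python) =====
-- def _has_tables(text: str) -> bool:
--     """Detect potential tables"""
--     # Look for patterns that might indicate tables, like multiple lines with similar structure
--     lines = text.split('\n')
--     space_patterns = []
--     for line in lines:
--         if len(line.strip()) > 0:
--             # Create a pattern of spaces in the line
--             pattern = ''.join(['S' if c.isspace() else 'C' for c in line])
--             space_patterns.append(pattern)
--
--     # Count repeating patterns
--     pattern_counts = {}
--     for pattern in space_patterns:
--         if len(pattern) > 10:  # Only consider substantive lines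
--             pattern_counts[pattern] = pattern_counts.get(pattern, 0) + 1
--
--     # If we have multiple lines with the same spacing pattern, it might be a table
--     return any(count >= 3 for count in pattern_counts.values())
-- ===== SOURCE B (Python) =====
-- def _has_tables(text: str) -> bool:
--     """Detect potential tables"""
--     lines = text.split('\n')
--     pats = [''.join('S' if c.isspace() else 'C' for c in line)
--             for line in lines if len(line.strip()) > 0]
--     big = sorted(p for p in pats if len(p) > 10)
--     # in a sorted list, big[i] == big[i+2] holds exactly when some pattern occurs >= 3 times
--     return any(a == c for a, c in zip(big, big[2:]))
-- ===== Notes on version B (the rewrite author's own statement) =====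
-- stated objective: alternative
-- what changed: Replaces the dict frequency tally over line patterns by sorting the long patterns and detecting a repeat of 3 as two equal elements two positions apart in the sorted list.
import Mathlib
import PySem

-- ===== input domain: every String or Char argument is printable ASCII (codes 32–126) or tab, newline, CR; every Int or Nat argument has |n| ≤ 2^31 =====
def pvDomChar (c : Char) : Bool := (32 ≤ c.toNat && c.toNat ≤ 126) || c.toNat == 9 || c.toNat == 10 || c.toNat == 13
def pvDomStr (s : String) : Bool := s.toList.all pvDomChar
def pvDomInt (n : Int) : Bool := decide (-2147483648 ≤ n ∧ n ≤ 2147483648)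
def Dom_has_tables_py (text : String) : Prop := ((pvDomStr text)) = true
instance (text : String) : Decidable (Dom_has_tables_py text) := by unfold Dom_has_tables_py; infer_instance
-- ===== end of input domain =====

-- B replaces A's dict frequency tally by sorting the long line patterns and looking for two
-- equal elements two positions apart in the sorted list (a run of 3); alternative algorithm, same result.

-- ===== PORT A =====
-- the 'S'/'C' whitespace pattern of a line: ''.join(['S' if c.isspace() else 'C' for c in line])
def pvPatternOf (line : String) : String :=
  PySem.Str.join "" (line.toList.map (fun c => if PySem.Chars.isspace c then "S" else "C"))

def has_tables_py (text : String) : Bool :=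
  -- lines = text.split('\n'); the separator is the non-empty literal '\n', so split? is always `some`
  let lines := (PySem.Str.split? text "\n").getD []
  let space_patterns := lines.foldl (fun acc line =>
    if 0 < PySem.Str.len (PySem.Str.strip line) then acc ++ [pvPatternOf line] else acc) []
  let pattern_counts := space_patterns.foldl (fun d pattern =>
    if 10 < PySem.Str.len pattern then d.insert pattern (d.getD pattern 0 + 1) else d)
    PySem.Dict.empty
  (PySem.Dict.values pattern_counts).any (fun count => decide ((3 : Int) ≤ count))

-- ===== PORT B =====
def has_tables_py_alt (text : String) : Bool :=
  let lines := (PySem.Str.split? text "\n").getD []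
  let pats := (lines.filter (fun line => decide (0 < PySem.Str.len (PySem.Str.strip line)))).map
    pvPatternOf
  let big := PySem.List.sorted (pats.filter (fun p => decide (10 < PySem.Str.len p)))
    (fun p => p) false
  (big.zip (PySem.List.slice big (some 2) none)).any (fun pq => pq.1 == pq.2)

-- ===== PRECONDITION & SPEC =====
def Spec_has_tables_py (text : String) (out : Bool) : Prop := out = has_tables_py_alt text
instance (text : String) (out : Bool) : Decidable (Spec_has_tables_py text out) := by unfold Spec_has_tables_py; infer_instance

-- ===== CLAIM (what is proved, stated in full; the proofs are below) =====
def Claim_equal_has_tables_py : Prop := ∀ (text : String), Dom_has_tables_py text → Spec_has_tables_py text (has_tables_py text)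

-- ===== LEMMAS AND PROOFS =====

-- A's append-if loop builds the filtered-and-mapped pattern list B builds by comprehension
theorem pv_patterns_eq (lines : List String) : ∀ (acc : List String),
    List.foldl (fun acc line =>
        if 0 < PySem.Str.len (PySem.Str.strip line) then acc ++ [pvPatternOf line] else acc)
      acc lines
      = acc ++ (lines.filter
          (fun line => decide (0 < PySem.Str.len (PySem.Str.strip line)))).map pvPatternOf := by
  induction lines with
  | nil => intro acc; simp
  | cons l t ih =>
      intro acc
      rw [List.foldl_cons, List.filter_cons]
      by_cases h : 0 < PySem.Str.len (PySem.Str.strip l)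
      · rw [if_pos h, ih, if_pos (by simpa using h), List.map_cons]
        simp
      · rw [if_neg h, ih, if_neg (by simpa using h)]

-- A's guarded counting loop is the plain counting loop over the filtered list
theorem pv_counts_eq (pats : List String) : ∀ (d : PySem.Dict String Int),
    List.foldl (fun d pattern =>
        if 10 < PySem.Str.len pattern then d.insert pattern (d.getD pattern 0 + 1) else d)
      d pats
      = (pats.filter (fun p => decide (10 < PySem.Str.len p))).foldl
          (fun d p => d.insert p (d.getD p 0 + 1)) d := by
  induction pats with
  | nil => intro d; rfl
  | cons p t ih =>
      intro d
      rw [List.foldl_cons, List.filter_cons]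
      by_cases h : 10 < PySem.Str.len p
      · rw [if_pos h, ih, if_pos (by simpa using h), List.foldl_cons]
      · rw [if_neg h, ih, if_neg (by simpa using h)]

-- in a ≤-sorted list, an element equal to the one two places later marks a run of 3;
-- that happens exactly when some value occurs at least 3 times
theorem pv_run3_iff {α : Type} [LinearOrder α] [BEq α] [LawfulBEq α] :
    ∀ (s : List α), s.Pairwise (· ≤ ·) →
      (((s.zip (s.drop 2)).any (fun pq => pq.1 == pq.2)) = true ↔ ∃ v, 3 ≤ s.count v) := by
  intro s
  induction s with
  | nil => simp
  | cons a t ih =>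
      intro h
      match t with
      | [] =>
          constructor
          · intro hx; simp at hx
          · rintro ⟨v, hv⟩
            have h2 : List.count v [a] ≤ [a].length := List.count_le_length
            simp only [List.length_cons, List.length_nil] at h2
            omega
      | [b] =>
          constructor
          · intro hx; simp at hx
          · rintro ⟨v, hv⟩
            have h2 : List.count v [a, b] ≤ [a, b].length := List.count_le_length
            simp only [List.length_cons, List.length_nil] at h2
            omega
      | b :: c :: t' =>
          rw [List.pairwise_cons] at h
          obtain ⟨ha, h'⟩ := h
          have hab : a ≤ b := ha b (by simp)
          have hac : a ≤ c := ha c (by simp)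
          have hbc : b ≤ c := (List.pairwise_cons.mp h').1 c (by simp)
          have hzip : ((a :: b :: c :: t').zip ((a :: b :: c :: t').drop 2))
              = (a, c) :: ((b :: c :: t').zip ((b :: c :: t').drop 2)) := by
            simp [List.zip]
          rw [hzip]
          simp only [List.any_cons, Bool.or_eq_true, beq_iff_eq]
          rw [ih h']
          by_cases hac2 : a = c
          · constructor
            · intro _
              have hab2 : a = b := le_antisymm hab (hac2 ▸ hbc)
              have hbc2 : b = c := hab2 ▸ hac2
              refine ⟨c, ?_⟩
              rw [show (a :: b :: c :: t') = c :: c :: c :: t' from by rw [hac2, hbc2],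
                  List.count_cons_self, List.count_cons_self, List.count_cons_self]
              omega
            · intro _; exact Or.inl hac2
          · constructor
            · rintro (h1 | h1)
              · exact absurd h1 hac2
              · obtain ⟨v, hv⟩ := h1
                refine ⟨v, ?_⟩
                rw [List.count_cons]
                split <;> omega
            · rintro ⟨v, hv⟩
              by_cases hva : v = a
              · subst hva
                rw [List.count_cons_self] at hv
                have h2 : 2 ≤ (b :: c :: t').count v := by omega
                exfalso
                have hvt : v ∈ t' := by
                  by_contra hnt
                  have h0 : t'.count v = 0 := List.count_eq_zero.mpr hnt
                  simp only [List.count_cons, h0, beq_iff_eq] at h2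
                  split_ifs at h2 <;> first | exact hac2 ‹c = v›.symm | omega
                have hcv : c ≤ v :=
                  (List.pairwise_cons.mp (List.pairwise_cons.mp h').2).1 v hvt
                exact hac2 (le_antisymm hac hcv)
              · right
                refine ⟨v, ?_⟩
                rw [List.count_cons] at hv
                simp only [beq_iff_eq] at hv
                rw [if_neg (fun hh => hva hh.symm)] at hv
                omega

-- the key equivalence: "some pattern counted ≥ 3 by the dict" = "run of 3 in the sorted list"
theorem pv_counts_eq_run (xs : List String) :
    ((PySem.Dict.counter xs).values.any (fun c => decide ((3 : Int) ≤ c)))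
      = (((PySem.List.sorted xs (fun p => p) false).zip
            (PySem.List.slice (PySem.List.sorted xs (fun p => p) false) (some 2) none)).any
          (fun pq => pq.1 == pq.2)) := by
  rw [PySem.List.slice_from _ (by norm_num : (0 : Int) ≤ 2)]
  have hpair : (PySem.List.sorted xs (fun p => p) false).Pairwise (· ≤ ·) :=
    PySem.List.sorted_pairwise xs (fun p => p)
  have hperm : (PySem.List.sorted xs (fun p => p) false).Perm xs :=
    PySem.List.sorted_perm xs (fun p => p) false
  have hrun := pv_run3_iff (PySem.List.sorted xs (fun p => p) false) hpair
  have hL : ((PySem.Dict.counter xs).values.any (fun c => decide ((3 : Int) ≤ c)) = true)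
      ↔ ∃ v, 3 ≤ (PySem.List.sorted xs (fun p => p) false).count v := by
    have hvals : (PySem.Dict.counter xs).values
        = (PySem.Set.ofList xs).map (fun k => ((xs.count k : Int))) := by
      show ((PySem.Dict.counter xs).items.map Prod.snd) = _
      rw [PySem.Dict.items_counter]
      simp
    rw [hvals]
    simp only [List.any_map, List.any_eq_true, Function.comp]
    constructor
    · rintro ⟨k, _, hk⟩
      refine ⟨k, ?_⟩
      rw [hperm.count_eq]
      simp only [decide_eq_true_eq] at hk
      exact_mod_cast hk
    · rintro ⟨v, hv⟩
      rw [hperm.count_eq] at hv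
      have hmem : v ∈ xs := List.count_pos_iff.mp (by omega)
      refine ⟨v, (PySem.Set.mem_ofList xs v).mpr hmem, ?_⟩
      simp only [decide_eq_true_eq]
      exact_mod_cast hv
  rw [show ((2 : Int).toNat) = 2 from rfl]
  cases hA : ((PySem.Dict.counter xs).values.any (fun c => decide ((3 : Int) ≤ c))) with
  | true => exact (hrun.mpr (hL.mp hA)).symm
  | false =>
      cases hB : ((PySem.List.sorted xs (fun p => p) false).zip
          ((PySem.List.sorted xs (fun p => p) false).drop 2)).any (fun pq => pq.1 == pq.2) with
      | false => rfl
      | true =>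
          have := hL.mpr (hrun.mp hB)
          rw [hA] at this
          exact Bool.noConfusion this

-- ===== VERDICT (by name: the statement is the Claim_ definition above) =====
theorem has_tables_py_spec : Claim_equal_has_tables_py := by
  intro text _
  show has_tables_py text = has_tables_py_alt text
  simp only [has_tables_py, has_tables_py_alt]
  rw [pv_patterns_eq, pv_counts_eq, List.nil_append,
      PySem.Dict.foldl_insert_getD_add_one_eq_counter, pv_counts_eq_run]
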